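-- pv_equiv track=rewrite | github.com/Hepaul7/CCGparser | pmb-5.1.0/src/ccg/fast_ccg.py | split_category
-- ===== SOURCE A (Python) =====
-- from typing import Self, Optional, Union, List, Dict
--
-- def split_category(category: str) -> List[str]:
--     parts = []
--     stack = []
--     i = 0
--     while i < len(category):
--         if category[i] == '(':
--             stack.append(i)
--         elif category[i] == ')':
--             start = stack.pop()
--             if not stack:  # Top-level parentheses
--                 parts.append(category[start + 1:i])
--         elif category[i] in '/\\' and not stack:  # Split at / or \ only at top level
--             parts.append(category[:i])
--             category = category[i + 1:]
--             i = 0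
--             continue
--         i += 1
--     if category:
--         parts.append(category)  # Remaining part if no split happens
--     return parts
-- ===== SOURCE B (Python) =====
-- def split_category(category):
--     parts = []
--     depth = 0
--     open_idx = 0
--     base = 0
--     for i, c in enumerate(category):
--         if c == '(':
--             if depth == 0:
--                 open_idx = i
--             depth += 1
--         elif c == ')':
--             depth -= 1
--             if depth == 0:
--                 parts.append(category[open_idx + 1:i])
--         elif c in '/\\' and depth == 0:
--             parts.append(category[base:i])
--             base = i + 1
--     if base < len(category):
--         parts.append(category[base:])
--     return parts
-- ===== Notes on version B (the rewrite author's own statement) =====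
-- stated objective: faster
-- what changed: B replaces A's restart-and-reslice loop (which copies the remaining string and resets i at every top-level slash) by one enumerate pass over the fixed string that tracks a nesting depth, the index of the outermost open paren, and a base offset, so no intermediate strings are built.
import Mathlib
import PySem

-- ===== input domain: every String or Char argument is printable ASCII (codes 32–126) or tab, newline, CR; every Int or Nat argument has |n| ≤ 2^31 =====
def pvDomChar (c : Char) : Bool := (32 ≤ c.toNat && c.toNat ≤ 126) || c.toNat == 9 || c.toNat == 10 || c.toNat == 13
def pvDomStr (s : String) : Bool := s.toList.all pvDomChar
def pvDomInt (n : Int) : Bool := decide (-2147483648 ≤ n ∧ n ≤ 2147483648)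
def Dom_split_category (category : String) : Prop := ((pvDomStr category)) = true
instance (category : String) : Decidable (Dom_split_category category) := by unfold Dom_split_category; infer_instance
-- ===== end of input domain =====

-- B replaces A's restart-and-reslice loop by one pass over the fixed string with a depth counter and a base offset (O(n) instead of O(n^2)).

-- ===== PORT A =====
-- A's while loop: state = (current truncated string, i, stack of '(' indices, parts).
-- The Python slices category[start+1:i], category[:i], category[i+1:] have 0 ≤ bounds ≤ len,
-- so drop/take is exact for them.
def splitA (s : List Char) (i : Nat) (stack : List Nat) (parts : List (List Char)) :
    List (List Char) :=
  if h : i < s.length then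
    if s[i] = '(' then splitA s (i + 1) (i :: stack) parts
    else if s[i] = ')' then
      -- start := stack.pop() : stack is a cons list with its top first; Python raises
      -- IndexError on an empty stack (excluded by Pre_split_category)
      if stack = [] then parts
      else if stack.tail = [] then
        splitA s (i + 1) stack.tail
          (parts ++ [(s.drop (stack.head! + 1)).take (i - (stack.head! + 1))])
      else splitA s (i + 1) stack.tail parts
    else if (s[i] = '/' ∨ s[i] = '\\') ∧ stack = [] then
      splitA (s.drop (i + 1)) 0 [] (parts ++ [s.take i])
    else splitA s (i + 1) stack parts
  else if s = [] then parts else parts ++ [s]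
termination_by s.length - i
decreasing_by
  · omega
  · omega
  · omega
  · simp only [List.length_drop]; omega
  · omega

def split_category (category : String) : List String :=
  (splitA category.toList 0 [] []).map (fun l => String.ofList l)

-- ===== PORT B =====
-- B's single for-loop over enumerate(category): rest = remaining suffix, i = its start index,
-- depth = paren nesting, opn = index of the outermost '(', base = start of the current part.
def splitB (s : List Char) : List Char → Nat → Int → Nat → Nat → List (List Char) →
    List (List Char)
  | [], _, _, _, base, parts => if base < s.length then parts ++ [s.drop base] else parts
  | c :: rest, i, depth, opn, base, parts =>
    if c = '(' then
      splitB s rest (i + 1) (depth + 1) (if depth = 0 then i else opn) base parts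
    else if c = ')' then
      if depth - 1 = 0 then
        splitB s rest (i + 1) (depth - 1) opn base
          (parts ++ [(s.drop (opn + 1)).take (i - (opn + 1))])
      else splitB s rest (i + 1) (depth - 1) opn base parts
    else if (c = '/' ∨ c = '\\') ∧ depth = 0 then
      splitB s rest (i + 1) depth opn (i + 1) (parts ++ [(s.drop base).take (i - base)])
    else splitB s rest (i + 1) depth opn base parts

def split_category_alt (category : String) : List String :=
  (splitB category.toList category.toList 0 0 0 0 []).map (fun l => String.ofList l)

-- ===== PRECONDITION & SPEC =====
-- Pre_ excludes exactly the strings with a prefix containing more ')' than '(' :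
-- there A's stack.pop() raises IndexError.
def Pre_split_category (category : String) : Prop :=
  ∀ n < category.toList.length + 1,
    (category.toList.take n).count ')' ≤ (category.toList.take n).count '('
instance (category : String) : Decidable (Pre_split_category category) := by
  unfold Pre_split_category; infer_instance

def pvWitness_split_category : String := "(A/B)/C"

def Spec_split_category (category : String) (out : List String) : Prop :=
  out = split_category_alt category
instance (category : String) (out : List String) : Decidable (Spec_split_category category out) := by unfold Spec_split_category; infer_instance

-- ===== CLAIM (what is proved, stated in full; the proofs are below) =====
def Claim_equal_split_category : Prop := ∀ (category : String), Dom_split_category category → Pre_split_category category → Spec_split_category category (split_category category)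

-- ===== LEMMAS AND PROOFS =====

-- shift the balance invariant across one consumed character
lemma bal_shift {c : Char} {t : List Char} {L L' : Nat}
    (h : ∀ n, ((c :: t).take n).count ')' ≤ L + ((c :: t).take n).count '(')
    (hL : (if c = '(' then L + 1 else if c = ')' then L - 1 else L) = L')
    (hc : c = ')' → 1 ≤ L) :
    ∀ n, (t.take n).count ')' ≤ L' + (t.take n).count '(' := by
  intro n
  have h1 := h (n + 1)
  simp only [List.take_succ_cons, List.count_cons] at h1
  by_cases h2 : c = '('
  · simp [h2] at h1 hL ⊢; omega
  · by_cases h3 : c = ')'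
    · have := hc h3
      simp [h3] at h1 hL; omega
    · simp [h2, h3] at h1 hL; omega

-- the key simulation: A's loop on the truncated string s.drop base at offset i equals
-- B's loop on the fixed string s at absolute position base + i
lemma key (s : List Char) :
    ∀ (k base i : Nat) (stack : List Nat) (opn : Nat) (parts : List (List Char)),
      s.length - (base + i) ≤ k →
      base ≤ s.length →
      (∀ hne : stack ≠ [], opn = base + stack.getLast hne) →
      (∀ n, ((s.drop (base + i)).take n).count ')' ≤
        stack.length + ((s.drop (base + i)).take n).count '(') →
      splitA (s.drop base) i stack parts =
        splitB s (s.drop (base + i)) (base + i) (stack.length : Int) opn base parts := by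
  intro k
  induction k with
  | zero =>
    intro base i stack opn parts hk hb _ _
    have hdrop : s.drop (base + i) = [] := by
      simp only [List.drop_eq_nil_iff]; omega
    have hi : ¬ i < (s.drop base).length := by
      simp only [List.length_drop]; omega
    rw [hdrop, splitA.eq_def, dif_neg hi]
    simp only [splitB]
    by_cases hbe : base < s.length
    · have : s.drop base ≠ [] := by simp only [ne_eq, List.drop_eq_nil_iff]; omega
      simp [hbe, this]
    · have : s.drop base = [] := by simp only [List.drop_eq_nil_iff]; omega
      simp [hbe, this]
  | succ k ih =>
    intro base i stack opn parts hk hb hopn hbal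
    by_cases hlt : base + i < s.length
    · have hsuffix : s.drop (base + i) = s[base + i] :: s.drop (base + i + 1) :=
        List.drop_eq_getElem_cons hlt
      have hi : i < (s.drop base).length := by simp only [List.length_drop]; omega
      have hgi : (s.drop base)[i] = s[base + i] := by rw [List.getElem_drop]
      have harith : base + (i + 1) = base + i + 1 := by omega
      rw [splitA.eq_def, dif_pos hi, hgi, hsuffix]
      simp only [splitB]
      by_cases hc1 : s[base + i] = '('
      · -- push
        rw [if_pos hc1, if_pos hc1]
        have hbal' : ∀ n, ((s.drop (base + (i + 1))).take n).count ')' ≤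
            (i :: stack).length + ((s.drop (base + (i + 1))).take n).count '(' := by
          rw [harith]
          have h2 := hbal
          rw [hsuffix, hc1] at h2
          exact bal_shift h2 (by simp) (by intro h; exact absurd h (by decide))
        have hopn' : ∀ hne : (i :: stack) ≠ [],
            (if (stack.length : Int) = 0 then base + i else opn) =
              base + (i :: stack).getLast hne := by
          intro _
          by_cases hst : stack = []
          · subst hst; simp
          · have h0 : (stack.length : Int) ≠ 0 := by
              simpa [List.length_eq_zero_iff] using hst
            rw [if_neg h0, List.getLast_cons hst]
            exact hopn hst
        have hrec := ih base (i + 1) (i :: stack) 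
          (if (stack.length : Int) = 0 then base + i else opn) parts
          (by omega) hb hopn' hbal'
        rw [harith] at hrec
        rw [hrec]
        congr 1
      · by_cases hc2 : s[base + i] = ')'
        · -- pop: the stack is nonempty thanks to hbal at n = 1
          have hone := hbal 1
          rw [hsuffix] at hone
          simp [hc2] at hone
          have hne : stack ≠ [] := List.ne_nil_of_length_pos (by omega)
          obtain ⟨start, rest, rfl⟩ := List.exists_cons_of_ne_nil hne
          rw [if_neg hc1, if_pos hc2, if_neg hc1, if_pos hc2, if_neg hne]
          simp only [List.tail_cons, List.head!_cons, List.length_cons]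
          have hbal' : ∀ n, ((s.drop (base + (i + 1))).take n).count ')' ≤
              rest.length + ((s.drop (base + (i + 1))).take n).count '(' := by
            rw [harith]
            have h2 := hbal
            rw [hsuffix, hc2] at h2
            exact bal_shift h2 (by simp) (by intro _; simp)
          by_cases hrest : rest = []
          · -- top-level close: both sides append the parenthesised content
            subst hrest
            rw [if_pos rfl, if_pos (by norm_num)]
            have hopn' : opn = base + start := by
              simpa [List.getLast] using hopn (by simp)
            have e1 : base + (start + 1) = opn + 1 := by omega
            have e2 : i - (start + 1) = base + i - (opn + 1) := by omega
            have hrec := ih base (i + 1) [] opn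
              (parts ++ [(s.drop (opn + 1)).take (base + i - (opn + 1))])
              (by omega) hb (by intro h; exact absurd rfl h) (by simpa using hbal')
            rw [harith] at hrec
            simpa [List.drop_drop, e1, e2] using hrec
          · rw [if_neg hrest,
              if_neg (by
                have : rest.length ≠ 0 := by simpa [List.length_eq_zero_iff] using hrest
                push_cast
                omega)]
            have hrec := ih base (i + 1) rest opn parts (by omega) hb
              (by
                intro hne2
                rw [hopn (by simp), List.getLast_cons hne2])
              hbal'
            rw [harith] at hrec
            rw [hrec]
            congr 1
            push_cast
            ring
        · by_cases hc3 : (s[base + i] = '/' ∨ s[base + i] = '\\') ∧ stack = []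
          · -- top-level slash: A restarts on the suffix, B advances its base offset
            obtain ⟨hsl, hst⟩ := hc3
            subst hst
            have hA : (s[base + i] = '/' ∨ s[base + i] = '\\') ∧ ([] : List Nat) = [] :=
              ⟨hsl, rfl⟩
            have hB : (s[base + i] = '/' ∨ s[base + i] = '\\') ∧
                ((([] : List Nat).length : Int) = 0) := ⟨hsl, by simp⟩
            rw [if_neg hc1, if_neg hc2, if_pos hA, if_neg hc1, if_neg hc2, if_pos hB]
            have hbal' : ∀ n, ((s.drop (base + i + 1)).take n).count ')' ≤
                ([] : List Nat).length + ((s.drop (base + i + 1)).take n).count '(' := by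
              have h2 := hbal
              rw [hsuffix] at h2
              refine bal_shift h2 ?_ (fun h => absurd h hc2)
              rcases hsl with h | h <;> simp [h]
            have hrec := ih (base + i + 1) 0 [] opn
              (parts ++ [(s.drop base).take i]) (by omega) (by omega)
              (by intro h; exact absurd rfl h) hbal'
            simp only [Nat.add_zero] at hrec
            have hcat : (s.drop base).drop (i + 1) = s.drop (base + i + 1) := by
              rw [List.drop_drop]
              congr 1
            have htake : (s.drop base).take (base + i - base) = (s.drop base).take i := by
              congr 1; omega
            rw [hcat, htake, hrec]
          · -- ordinary character: both sides just advance
            rw [if_neg hc1, if_neg hc2, if_neg hc3, if_neg hc1, if_neg hc2,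
              if_neg (by
                intro ⟨h1, h2⟩
                exact hc3 ⟨h1, by simpa [List.length_eq_zero_iff] using h2⟩)]
            have hrec := ih base (i + 1) stack opn parts (by omega) hb hopn
              (by
                rw [harith]
                have h2 := hbal
                rw [hsuffix] at h2
                exact bal_shift h2 (by simp [hc1, hc2]) (fun h => absurd h hc2))
            rw [harith] at hrec
            exact hrec
    · -- the loop is finished on both sides
      have hdrop : s.drop (base + i) = [] := by
        simp only [List.drop_eq_nil_iff]; omega
      have hi : ¬ i < (s.drop base).length := by simp only [List.length_drop]; omega
      rw [hdrop, splitA.eq_def, dif_neg hi]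
      simp only [splitB]
      by_cases hbe : base < s.length
      · have : s.drop base ≠ [] := by simp only [ne_eq, List.drop_eq_nil_iff]; omega
        simp [hbe, this]
      · have : s.drop base = [] := by simp only [List.drop_eq_nil_iff]; omega
        simp [hbe, this]

-- ===== VERDICT (by name: the statement is the Claim_ definition above) =====
theorem split_category_spec : Claim_equal_split_category := by
  intro category _ hpre
  unfold Spec_split_category split_category split_category_alt
  congr 1
  have hbal : ∀ n, ((category.toList.drop (0 + 0)).take n).count ')' ≤
      ([] : List Nat).length + ((category.toList.drop (0 + 0)).take n).count '(' := by
    intro n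
    simp only [Nat.add_zero, List.drop_zero, List.length_nil, Nat.zero_add]
    by_cases hn : n < category.toList.length + 1
    · exact hpre n hn
    · have h1 : category.toList.take n = category.toList := by
        apply List.take_of_length_le; omega
      have h2 := hpre category.toList.length (by omega)
      rw [List.take_length] at h2
      rw [h1]; exact h2
  have := key category.toList category.toList.length 0 0 [] 0 [] (by omega) (by omega)
    (by intro h; exact absurd rfl h) hbal
  simpa using this
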